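-- pv_equiv track=rewrite | github.com/Helgi1981/Py_Sem6 | Task5.py | find_indices_recursive
-- ===== SOURCE A (Python) =====
-- def find_indices_recursive(lst, min_number, max_number, index=0, indices=None):
--     """Рекурсивная функция для нахождения индексов элементов, попадающих в заданный диапазон"""
--     if indices is None:
--         indices = []
--     if index == len(lst):
--         return indices
--     if min_number <= lst[index] <= max_number:
--         indices.append(index)
--     return find_indices_recursive(lst, min_number, max_number, index + 1, indices)
-- ===== SOURCE B (Python) =====
-- def find_indices_recursive(lst, min_number, max_number, index=0, indices=None):
--     """Find indices of elements in [min_number, max_number], as a single extend over a range."""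
--     if indices is None:
--         indices = []
--     indices.extend(i for i in range(index, len(lst))
--                    if min_number <= lst[i] <= max_number)
--     return indices
-- ===== Notes on version B (the rewrite author's own statement) =====
-- stated objective: simpler
-- what changed: Replaces A's per-element tail recursion (one Python call frame per element) with a single extend of a generator comprehension over range(index, len(lst)); this also avoids Python's recursion limit on long lists.
-- crash fix: When index > len(lst), A raises IndexError via lst[index] while B's empty range makes it return the passed-in indices list unchanged. — e.g. on find_indices_recursive([5], 0, 9, 2, some [7]): A raises IndexError, B returns [7]
import Mathlib
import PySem

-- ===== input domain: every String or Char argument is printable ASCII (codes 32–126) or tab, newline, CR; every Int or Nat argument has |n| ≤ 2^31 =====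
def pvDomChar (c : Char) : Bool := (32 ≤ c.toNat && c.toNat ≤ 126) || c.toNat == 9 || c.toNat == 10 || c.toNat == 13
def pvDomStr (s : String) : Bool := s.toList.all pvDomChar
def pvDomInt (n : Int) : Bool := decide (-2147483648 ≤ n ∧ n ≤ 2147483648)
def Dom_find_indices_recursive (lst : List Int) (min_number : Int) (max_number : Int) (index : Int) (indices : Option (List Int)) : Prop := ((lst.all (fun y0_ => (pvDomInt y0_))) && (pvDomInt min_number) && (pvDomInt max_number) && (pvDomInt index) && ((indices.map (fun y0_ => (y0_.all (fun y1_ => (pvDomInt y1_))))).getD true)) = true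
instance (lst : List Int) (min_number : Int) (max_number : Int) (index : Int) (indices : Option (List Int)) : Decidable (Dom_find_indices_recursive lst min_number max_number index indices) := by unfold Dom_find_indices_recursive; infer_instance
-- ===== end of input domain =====

-- B replaces A's per-element recursion by a single extend over a filtered range (simpler decomposition);
-- equivalence is about the RETURN value (both also mutate/return the passed-in `indices` list the same way).

-- ===== PORT A =====
-- A's tail recursion on `index`; fuel covers the ≤ 2·len+1 recursive calls made inside Pre_.
-- The `none` branch of pyGet? (Python: IndexError) is outside Pre_.
def find_indices_recursive_go (lst : List Int) (min_number max_number : Int) :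
    Nat → Int → List Int → List Int
  | 0, _, indices => indices
  | fuel+1, index, indices =>
    if index = (lst.length : Int) then indices
    else
      match PySem.List.pyGet? lst index with
      | none => indices
      | some v =>
        find_indices_recursive_go lst min_number max_number fuel (index + 1)
          (if min_number ≤ v ∧ v ≤ max_number then indices ++ [index] else indices)

def find_indices_recursive (lst : List Int) (min_number : Int) (max_number : Int) (index : Int) (indices : Option (List Int)) : List Int :=
  let indices0 := match indices with | none => [] | some l => l   -- if indices is None: indices = []
  find_indices_recursive_go lst min_number max_number
    ((2 * lst.length + 1 : Int) - index).toNat index indices0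

-- ===== PORT B =====
-- the genexp's condition `min_number <= lst[i] <= max_number`; the `none` case (IndexError) is outside Pre_
def pvInRangeAt (lst : List Int) (min_number max_number : Int) (i : Int) : Bool :=
  match PySem.List.pyGet? lst i with
  | some v => decide (min_number ≤ v ∧ v ≤ max_number)
  | none => false

def find_indices_recursive_alt (lst : List Int) (min_number : Int) (max_number : Int) (index : Int) (indices : Option (List Int)) : List Int :=
  let indices0 := match indices with | none => [] | some l => l
  indices0 ++ (PySem.List.pyRange index lst.length 1).filter (pvInRangeAt lst min_number max_number)

-- ===== PRECONDITION & SPEC =====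
-- Pre_ excludes exactly the inputs where Python A raises IndexError: index outside [-len(lst), len(lst)].
def Pre_find_indices_recursive (lst : List Int) (min_number : Int) (max_number : Int) (index : Int) (indices : Option (List Int)) : Prop :=
  -(lst.length : Int) ≤ index ∧ index ≤ (lst.length : Int)
instance (lst : List Int) (min_number : Int) (max_number : Int) (index : Int) (indices : Option (List Int)) : Decidable (Pre_find_indices_recursive lst min_number max_number index indices) := by unfold Pre_find_indices_recursive; infer_instance

def pvWitness_find_indices_recursive : List Int × Int × Int × Int × Option (List Int) := ([3, -1, 4, 1], 0, 3, 0, none)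

-- On index > len(lst) Python A raises IndexError while B returns the passed-in indices unchanged (empty range).
def Raises_find_indices_recursive (lst : List Int) (min_number : Int) (max_number : Int) (index : Int) (indices : Option (List Int)) : Prop :=
  (lst.length : Int) < index
instance (lst : List Int) (min_number : Int) (max_number : Int) (index : Int) (indices : Option (List Int)) : Decidable (Raises_find_indices_recursive lst min_number max_number index indices) := by unfold Raises_find_indices_recursive; infer_instance
def pvRaiseWitness_find_indices_recursive : List Int × Int × Int × Int × Option (List Int) := ([5], 0, 9, 2, some [7])
def pvRaiseWitnessOut_find_indices_recursive : List Int := [7]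

def Spec_find_indices_recursive (lst : List Int) (min_number : Int) (max_number : Int) (index : Int) (indices : Option (List Int)) (out : List Int) : Prop := out = find_indices_recursive_alt lst min_number max_number index indices
instance (lst : List Int) (min_number : Int) (max_number : Int) (index : Int) (indices : Option (List Int)) (out : List Int) : Decidable (Spec_find_indices_recursive lst min_number max_number index indices out) := by unfold Spec_find_indices_recursive; infer_instance

-- ===== CLAIM (what is proved, stated in full; the proofs are below) =====
def Claim_equal_find_indices_recursive : Prop := ∀ (lst : List Int) (min_number : Int) (max_number : Int) (index : Int) (indices : Option (List Int)), Dom_find_indices_recursive lst min_number max_number index indices → Pre_find_indices_recursive lst min_number max_number index indices → Spec_find_indices_recursive lst min_number max_number index indices (find_indices_recursive lst min_number max_number index indices)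

def Claim_raises_find_indices_recursive : Prop := (∀ (lst : List Int) (min_number : Int) (max_number : Int) (index : Int) (indices : Option (List Int)), Dom_find_indices_recursive lst min_number max_number index indices → Raises_find_indices_recursive lst min_number max_number index indices → ¬ Pre_find_indices_recursive lst min_number max_number index indices) ∧ (Dom_find_indices_recursive (pvRaiseWitness_find_indices_recursive.1) (pvRaiseWitness_find_indices_recursive.2.1) (pvRaiseWitness_find_indices_recursive.2.2.1) (pvRaiseWitness_find_indices_recursive.2.2.2.1) (pvRaiseWitness_find_indices_recursive.2.2.2.2) ∧ Raises_find_indices_recursive (pvRaiseWitness_find_indices_recursive.1) (pvRaiseWitness_find_indices_recursive.2.1) (pvRaiseWitness_find_indices_recursive.2.2.1) (pvRaiseWitness_find_indices_recursive.2.2.2.1) (pvRaiseWitness_find_indices_recursive.2.2.2.2) ∧ find_indices_recursive_alt (pvRaiseWitness_find_indices_recursive.1) (pvRaiseWitness_find_indices_recursive.2.1) (pvRaiseWitness_find_indices_recursive.2.2.1) (pvRaiseWitness_find_indices_recursive.2.2.2.1) (pvRaiseWitness_find_indices_recursive.2.2.2.2) = pvRaiseWitnessOut_find_indices_recursive)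

-- ===== LEMMAS AND PROOFS =====

-- loop invariant: with enough fuel and an in-range index, A's recursion produces
-- the accumulator followed by the filtered remaining range.
theorem find_indices_recursive_go_eq (lst : List Int) (mi ma : Int) :
    ∀ (fuel : Nat) (index : Int) (acc : List Int),
      -(lst.length : Int) ≤ index → index ≤ (lst.length : Int) →
      ((lst.length : Int) - index).toNat < fuel →
      find_indices_recursive_go lst mi ma fuel index acc
        = acc ++ (PySem.List.pyRange index lst.length 1).filter (pvInRangeAt lst mi ma) := by
  intro fuel
  induction fuel with
  | zero => intro index acc _ _ hf; omega
  | succ n ih =>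
    intro index acc hlo hhi hf
    by_cases heq : index = (lst.length : Int)
    · subst heq
      simp [find_indices_recursive_go, PySem.List.pyRange_one_eq_nil le_rfl]
    · have hlt : index < (lst.length : Int) := lt_of_le_of_ne hhi heq
      have hin : PySem.Raise.InRange lst.length index := ⟨hlo, hlt⟩
      obtain ⟨v, hv⟩ : ∃ v, PySem.List.pyGet? lst index = some v := by
        cases h : PySem.List.pyGet? lst index with
        | none => exact absurd ((PySem.List.pyGet?_eq_none_iff lst index).mp h) (not_not_intro hin)
        | some v => exact ⟨v, rfl⟩
      rw [PySem.List.pyRange_one_cons hlt]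
      have hrec := ih (index + 1) (if mi ≤ v ∧ v ≤ ma then acc ++ [index] else acc)
        (by omega) (by omega) (by omega)
      simp only [find_indices_recursive_go, if_neg heq, hv, hrec]
      simp only [List.filter_cons, pvInRangeAt, hv]
      by_cases hc : mi ≤ v ∧ v ≤ ma
      · simp [hc]
      · simp [hc]

-- ===== VERDICT (by name: the statement is the Claim_ definition above) =====
theorem find_indices_recursive_spec : Claim_equal_find_indices_recursive := by
  intro lst mi ma index indices _ hpre
  obtain ⟨h1, h2⟩ := hpre
  unfold Spec_find_indices_recursive find_indices_recursive find_indices_recursive_alt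
  exact find_indices_recursive_go_eq lst mi ma _ index _ h1 h2 (by omega)

@[simp]
theorem find_indices_recursive_raises : Claim_raises_find_indices_recursive := by
  unfold Claim_raises_find_indices_recursive
  refine ⟨?_, by decide⟩
  intro lst mi ma index indices _ hr hpre
  exact absurd hpre.2 (not_le.mpr hr)
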